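-- pv_equiv track=rewrite | github.com/iesl/editable_user_profiles-lace | src/learning/rec_batchers.py | _check_batch
-- ===== SOURCE A (Python) =====
-- def _check_batch(upids):
--     """
--     :param upids: list(list(str))
--     todo: this is a temporary fix and just excludes a batch which isnt correct. --low-pri.
--     For any given users papers there should be equal or more other user papers so negatives
--     can be created with in batch sampling.
--     """
--     negs_okay = True
--     for ui, upid in enumerate(upids):
--         cur_pids = len(upid)
--         other_pids = 0
--         for i, up in enumerate(upids):
--             if i != ui:
--                 other_pids += len(up)
--         if cur_pids > other_pids:
--             negs_okay = False
--             break
--     return negs_okay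
-- ===== SOURCE B (Python) =====
-- def _check_batch(upids):
--     total = sum(len(u) for u in upids)
--     return all(2 * len(u) <= total for u in upids)
-- ===== Notes on version B (the rewrite author's own statement) =====
-- stated objective: faster
-- what changed: Replaced the nested loop (re-summing all other users' paper counts for every user) by a single precomputed total, checking 2*len(u) <= total per user.
import Mathlib
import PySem

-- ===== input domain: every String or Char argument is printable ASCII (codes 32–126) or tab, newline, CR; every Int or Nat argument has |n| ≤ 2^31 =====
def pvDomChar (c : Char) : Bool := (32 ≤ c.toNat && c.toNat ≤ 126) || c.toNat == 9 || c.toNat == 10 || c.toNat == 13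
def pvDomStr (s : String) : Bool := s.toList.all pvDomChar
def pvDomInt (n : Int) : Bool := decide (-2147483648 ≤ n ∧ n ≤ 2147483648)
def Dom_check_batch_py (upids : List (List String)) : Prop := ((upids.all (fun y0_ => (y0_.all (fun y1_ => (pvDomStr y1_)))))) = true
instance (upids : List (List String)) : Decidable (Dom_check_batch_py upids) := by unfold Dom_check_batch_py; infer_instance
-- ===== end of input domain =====

-- B replaces A's quadratic nested re-summation by one precomputed total (other = total - cur); objective: faster (asymptotic).


-- ===== PORT A =====
-- inner loop: `for i, up in enumerate(upids): if i != ui: other_pids += len(up)` (enumerate as a running counter i)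
def pvOtherLoop (ui : Nat) : Nat → List (List String) → Int → Int
  | _, [], acc => acc
  | i, up :: rest, acc => pvOtherLoop ui (i + 1) rest (if i ≠ ui then acc + PySem.List.len up else acc)

-- outer loop: `for ui, upid in enumerate(upids): … if cur_pids > other_pids: break`
def pvCheckLoop (upids : List (List String)) : Nat → List (List String) → Bool
  | _, [] => true
  | ui, upid :: rest =>
      let cur_pids := PySem.List.len upid
      let other_pids := pvOtherLoop ui 0 upids 0
      if cur_pids > other_pids then false else pvCheckLoop upids (ui + 1) rest

def check_batch_py (upids : List (List String)) : Bool := pvCheckLoop upids 0 upids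

-- ===== PORT B =====
def check_batch_py_alt (upids : List (List String)) : Bool :=
  let total := upids.foldl (fun acc u => acc + PySem.List.len u) 0
  upids.all (fun u => decide (2 * PySem.List.len u ≤ total))

-- ===== PRECONDITION & SPEC =====
def Spec_check_batch_py (upids : List (List String)) (out : Bool) : Prop := out = check_batch_py_alt upids
instance (upids : List (List String)) (out : Bool) : Decidable (Spec_check_batch_py upids out) := by unfold Spec_check_batch_py; infer_instance

-- ===== CLAIM (what is proved, stated in full; the proofs are below) =====
def Claim_equal_check_batch_py : Prop := ∀ (upids : List (List String)), Dom_check_batch_py upids → Spec_check_batch_py upids (check_batch_py upids)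

-- ===== LEMMAS AND PROOFS =====

/-- total number of papers, as a plain sum -/
def pvS (l : List (List String)) : Int := (l.map PySem.List.len).sum

lemma pvOtherLoop_eq (ui : Nat) : ∀ (l : List (List String)) (i : Nat) (acc : Int),
    pvOtherLoop ui i l acc
      = acc + pvS l - (if i ≤ ui ∧ ui < i + l.length then PySem.List.len (l.getD (ui - i) []) else 0) := by
  intro l
  induction l with
  | nil => intro i acc; simp [pvOtherLoop, pvS]
  | cons a t ih =>
    intro i acc
    simp only [pvOtherLoop, ih, pvS, List.map_cons, List.sum_cons, List.length_cons]
    by_cases h : i = ui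
    · subst h
      have h1 : ¬ (i + 1 ≤ i) := by omega
      have h2 : i ≤ i ∧ i < i + (t.length + 1) := by omega
      simp [h1, h2]
      omega
    · have hgd : i ≤ ui → (a :: t).getD (ui - i) [] = t.getD (ui - i - 1) [] := by
        intro hle
        have : ui - i = (ui - i - 1) + 1 := by omega
        rw [this]; rfl
      by_cases h3 : i + 1 ≤ ui ∧ ui < i + 1 + t.length
      · have h4 : i ≤ ui ∧ ui < i + (t.length + 1) := by omega
        rw [hgd h4.1, if_pos h, if_pos h3, if_pos h4]
        have he : ui - (i + 1) = ui - i - 1 := by omega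
        rw [he]
        ring
      · have h4 : ¬ (i ≤ ui ∧ ui < i + (t.length + 1)) := by omega
        simp [h, h4]
        omega

lemma pvCheckLoop_eq : ∀ (rest pre : List (List String)),
    pvCheckLoop (pre ++ rest) pre.length rest
      = rest.all (fun u => decide (2 * PySem.List.len u ≤ pvS (pre ++ rest))) := by
  intro rest
  induction rest with
  | nil => intro pre; simp [pvCheckLoop]
  | cons cur rest' ih =>
    intro pre
    have hgd : (pre ++ cur :: rest').getD pre.length [] = cur := by
      rw [List.getD_eq_getElem?_getD, List.getElem?_append_right (le_refl _)]
      simp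
    have hother : pvOtherLoop pre.length 0 (pre ++ cur :: rest') 0
        = pvS (pre ++ cur :: rest') - PySem.List.len cur := by
      rw [pvOtherLoop_eq]
      have hc : 0 ≤ pre.length ∧ pre.length < 0 + (pre ++ cur :: rest').length := by
        simp
      simp [hc]
    simp only [pvCheckLoop, hother]
    by_cases hbreak : PySem.List.len cur > pvS (pre ++ cur :: rest') - PySem.List.len cur
    · have hb' : pvS (pre ++ cur :: rest') - (cur.length : Int) < (cur.length : Int) := by
        simpa [PySem.List.len_eq] using hbreak
      have hn : ¬ (2 * (cur.length : Int) ≤ pvS (pre ++ cur :: rest')) := by omega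
      simp [hb', hn]
    · have h2 : 2 * PySem.List.len cur ≤ pvS (pre ++ cur :: rest') := by omega
      have hlen : pre.length + 1 = (pre ++ [cur]).length := by simp
      have happ : pre ++ cur :: rest' = (pre ++ [cur]) ++ rest' := by simp
      simp only [hbreak]
      rw [happ, hlen, ih (pre ++ [cur])]
      simp [← happ]
      intro _
      simpa [PySem.List.len_eq] using h2

lemma pvTotal_eq (l : List (List String)) :
    l.foldl (fun acc u => acc + PySem.List.len u) 0 = pvS l := by
  rw [PySem.List.foldl_add]
  simp [pvS]

-- ===== VERDICT (by name: the statement is the Claim_ definition above) =====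
theorem check_batch_py_spec : Claim_equal_check_batch_py := by
  intro upids _
  show check_batch_py upids = check_batch_py_alt upids
  have h := pvCheckLoop_eq upids []
  simp only [List.nil_append, List.length_nil] at h
  simp only [check_batch_py, check_batch_py_alt, h, pvTotal_eq]
  rfl
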